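-- pv_equiv track=rewrite | github.com/LeedsJohn/Scramble-Generator | Mover.py | reverse
-- ===== SOURCE A (Python) =====
-- def reverse(scramble):
--     """
--     Receives a set of moves and returns the inverse
--     Ex: "R U D' L F2" --> "F2 L' D U' R'"
--     """
--     reversed = ""
--     prev = "*"
--     for c in scramble[::-1]:
--         if c in "RUFLDBrufldbMSExyz":
--             reversed += c
--             if prev == ' ' or prev == '*':
--                 reversed += "'"
--             elif prev == "2":
--                 reversed += "2"
--             reversed += ' '
--         prev = c
--     return reversed.strip()
-- ===== SOURCE B (Python) =====
-- def reverse(scramble):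
--     """Forward zip-with-lookahead pass building a move list, joined in reverse."""
--     moves = []
--     for c, nxt in zip(scramble, scramble[1:] + ' '):
--         if c in "RUFLDBrufldbMSExyz":
--             moves.append(c + "'" if nxt == ' ' else c + '2' if nxt == '2' else c)
--     return ' '.join(reversed(moves))
-- ===== Notes on version B (the rewrite author's own statement) =====
-- stated objective: alternative
-- what changed: Replaces A's backward scan with a trailing prev and string concatenation plus final strip by a forward zip-with-lookahead pass that collects inverted moves in a list and returns ' '.join(reversed(moves)).
-- intended difference: On inputs where a move letter is immediately followed by a literal '*', A's end-of-string sentinel '*' leaks and A appends a spurious "'" to that move (e.g. A('R*') = "R'"), while B leaves the move unmodified (B('R*') = 'R'), the intended value since '*' is not a cube-move modifier. — e.g. on reverse("R*"): A returns "R'", B returns "R"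
import Mathlib
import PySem

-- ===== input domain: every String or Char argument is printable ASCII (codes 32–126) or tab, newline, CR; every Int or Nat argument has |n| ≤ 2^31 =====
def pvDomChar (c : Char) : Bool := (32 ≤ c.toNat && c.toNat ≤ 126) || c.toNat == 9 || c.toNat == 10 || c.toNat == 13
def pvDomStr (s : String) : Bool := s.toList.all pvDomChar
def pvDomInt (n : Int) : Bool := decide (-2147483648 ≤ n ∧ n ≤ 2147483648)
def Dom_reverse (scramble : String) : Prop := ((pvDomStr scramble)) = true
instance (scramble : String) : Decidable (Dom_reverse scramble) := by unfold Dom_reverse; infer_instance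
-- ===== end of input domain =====

-- B replaces A's backward scan with a trailing `prev` by a forward zip-with-lookahead pass
-- that collects the inverted moves in a list and joins it reversed (objective: alternative;
-- on letters followed by a literal '*' A's sentinel leaks and B returns the intended value, see D_).

-- the move alphabet "RUFLDBrufldbMSExyz" (single-char membership test `c in "..."`)
def pvLetters : List Char :=
  ['R','U','F','L','D','B','r','u','f','l','d','b','M','S','E','x','y','z']

-- ===== PORT A =====
-- A's loop body: state = (reversed-so-far, prev); prev is updated on every character
def pvStepA (st : List Char × Char) (c : Char) : List Char × Char :=
  if pvLetters.contains c then
    let r1 := st.1 ++ [c]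
    let r2 := if st.2 = ' ' ∨ st.2 = '*' then r1 ++ ['\'']
              else if st.2 = '2' then r1 ++ ['2'] else r1
    (r2 ++ [' '], c)
  else (st.1, c)

def reverse (scramble : String) : String :=
  -- scramble[::-1] is the reversed character list (PySem.List.slice?_none_none_neg_one)
  let st := scramble.toList.reverse.foldl pvStepA ([], '*')
  String.ofList (PySem.Chars.strip st.1)

-- ===== PORT B =====
def pvMoveB (c nxt : Char) : List Char :=
  if nxt = ' ' then [c, '\''] else if nxt = '2' then [c, '2'] else [c]

def reverse_alt (scramble : String) : String :=
  let s := scramble.toList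
  -- zip(scramble, scramble[1:] + ' '): scramble[1:] is s.drop 1 (PySem.List.slice_from_one)
  let moves := (s.zip (s.drop 1 ++ [' '])).foldl
    (fun acc p => if pvLetters.contains p.1 then acc ++ [pvMoveB p.1 p.2] else acc) []
  String.ofList (PySem.Chars.join [' '] moves.reverse)

-- ===== PRECONDITION & SPEC =====
-- On inputs where a move letter is immediately followed by a literal '*', A's end-of-string
-- sentinel '*' leaks and A appends a spurious "'" to that move, while B leaves the move
-- unmodified, which is the intended reading ('*' is not a cube-move modifier).
-- 'some move letter of scramble is immediately followed by a literal star': a single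
-- left-to-right scan carrying the previous character (tail-recursive so it is cheap to
-- decide even on large literal inputs)
def D_reverse (scramble : String) : Prop :=
  (scramble.toList.foldl
    (fun (st : Bool × Char) c => (st.1 || (c == '*' && pvLetters.contains st.2), c))
    (false, ' ')).1 = true
instance (scramble : String) : Decidable (D_reverse scramble) := by unfold D_reverse; infer_instance

def Spec_reverse (scramble : String) (out : String) : Prop :=
  ¬ D_reverse scramble → out = reverse_alt scramble
instance (scramble : String) (out : String) : Decidable (Spec_reverse scramble out) := by
  unfold Spec_reverse; infer_instance

def pvDiffWitness_reverse : String := "R*"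
def pvDiffWitnessOut_reverse : String × String := ("R'", "R")

-- ===== CLAIM (what is proved, stated in full; the proofs are below) =====
def Claim_unchanged_reverse : Prop :=
  ∀ (scramble : String), Dom_reverse scramble → Spec_reverse scramble (reverse scramble)
def Claim_changed_reverse : Prop :=
  Dom_reverse (pvDiffWitness_reverse) ∧ D_reverse (pvDiffWitness_reverse) ∧
  reverse (pvDiffWitness_reverse) = pvDiffWitnessOut_reverse.1 ∧
  reverse_alt (pvDiffWitness_reverse) = pvDiffWitnessOut_reverse.2 ∧
  pvDiffWitnessOut_reverse.1 ≠ pvDiffWitnessOut_reverse.2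
def Claim_exact_reverse : Prop :=
  ∀ (scramble : String), Dom_reverse scramble → D_reverse scramble →
    reverse scramble ≠ reverse_alt scramble

-- ===== LEMMAS AND PROOFS =====

-- A's modifier as a function of prev
def pvModA (p : Char) : List Char :=
  if p = ' ' ∨ p = '*' then ['\''] else if p = '2' then ['2'] else []

-- right-to-left rendering A produces (on the ORIGINAL string, recursing on the head)
def pvOutA : List Char → List Char
  | [] => []
  | c :: t => pvOutA t ++ (if pvLetters.contains c then c :: (pvModA (t.headD '*') ++ [' ']) else [])

-- forward move list B produces
def pvOutB : List Char → List (List Char)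
  | [] => []
  | c :: t => if pvLetters.contains c then pvMoveB c (t.headD ' ') :: pvOutB t else pvOutB t

theorem pvStepA_snd (st : List Char × Char) (c : Char) : (pvStepA st c).2 = c := by
  unfold pvStepA; split <;> rfl

theorem pv_foldl_snd (l : List Char) (st : List Char × Char) :
    (l.foldl pvStepA st).2 = l.getLastD st.2 := by
  induction l generalizing st with
  | nil => rfl
  | cons c t ih =>
    simp only [List.foldl_cons, ih, pvStepA_snd]
    cases t <;> simp [List.getLastD]

-- the chunk A appends when it sees c with previous-in-reversed-order prev
def pvDelta (c p : Char) : List Char :=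
  if pvLetters.contains c then c :: (pvModA p ++ [' ']) else []

theorem pvStepA_eq (st : List Char × Char) (c : Char) :
    pvStepA st c = (st.1 ++ pvDelta c st.2, c) := by
  unfold pvStepA pvDelta pvModA
  split_ifs <;> simp

theorem pv_A_char (s : List Char) : (s.reverse.foldl pvStepA ([], '*')).1 = pvOutA s := by
  induction s with
  | nil => rfl
  | cons c t ih =>
    have hsnd : (t.reverse.foldl pvStepA (([] : List Char), '*')).2 = t.headD '*' := by
      rw [pv_foldl_snd]
      simp [List.getLastD_eq_getLast?, List.getLast?_reverse]
    simp only [List.reverse_cons, List.foldl_append, List.foldl_cons, List.foldl_nil,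
      pvStepA_eq, pvOutA, ih, hsnd]
    unfold pvDelta
    split <;> simp

theorem pv_zip_cons (c : Char) (t : List Char) :
    (c :: t).zip ((c :: t).drop 1 ++ [' ']) = (c, t.headD ' ') :: t.zip (t.drop 1 ++ [' ']) := by
  cases t <;> simp

theorem pv_B_moves_gen (s : List Char) (acc : List (List Char)) :
    (s.zip (s.drop 1 ++ [' '])).foldl
      (fun acc p => if pvLetters.contains p.1 then acc ++ [pvMoveB p.1 p.2] else acc) acc
    = acc ++ pvOutB s := by
  induction s generalizing acc with
  | nil => simp [pvOutB]
  | cons c t ih =>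
    rw [pv_zip_cons, List.foldl_cons]
    by_cases hc : pvLetters.contains c = true <;>
      simp only [hc, Bool.false_eq_true, if_true, if_false] <;>
      rw [ih] <;> by_cases hc' : c ∈ pvLetters <;>
      simp_all [pvOutB]

-- A's rendering, as the move list it concatenates (reversed, each move followed by ' ')
def pvOutA' : List Char → List (List Char)
  | [] => []
  | c :: t => if pvLetters.contains c then (c :: pvModA (t.headD '*')) :: pvOutA' t else pvOutA' t

theorem pv_outA_moves (s : List Char) :
    pvOutA s = ((pvOutA' s).map (· ++ [' '])).reverse.flatten := by
  induction s with
  | nil => rfl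
  | cons c t ih =>
    by_cases hc : c ∈ pvLetters <;> simp [pvOutA, pvOutA', hc, ih]

-- outside D_, A's move list and B's move list coincide
theorem pv_moves_eq (s : List Char)
    (hD : ∀ p ∈ s.zip s.tail, ¬(pvLetters.contains p.1 = true ∧ p.2 = '*')) :
    pvOutA' s = pvOutB s := by
  induction s with
  | nil => rfl
  | cons c t ih =>
    have hsub : ∀ p ∈ t.zip t.tail, p ∈ (c :: t).zip (c :: t).tail := by
      cases t with
      | nil => intro p hp; simp at hp
      | cons d t' =>
        intro p hp
        simp only [List.tail_cons, List.zip_cons_cons]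
        exact List.mem_cons_of_mem _ (by simpa using hp)
    have ih' := ih (fun p hp => hD p (hsub p hp))
    by_cases hc : c ∈ pvLetters
    · have hkey : c :: pvModA (t.headD '*') = pvMoveB c (t.headD ' ') := by
        cases t with
        | nil => simp [pvModA, pvMoveB]
        | cons d t' =>
          have hdne : d ≠ '*' := by
            have := hD (c, d) (by simp)
            intro h; exact this ⟨by simpa using hc, h⟩
          simp only [List.headD_cons]
          unfold pvModA pvMoveB
          by_cases h1 : d = ' '
          · simp [h1]
          · by_cases h2 : d = '2' <;> simp [h1, h2, hdne]
      have hkey' : c :: pvModA (t.head?.getD '*') = pvMoveB c (t.head?.getD ' ') := by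
        simpa using hkey
      simp [pvOutA', pvOutB, hc, ih', hkey']
    · simp [pvOutA', pvOutB, hc, ih']

-- every move B emits is nonempty and contains no whitespace
def pvGoodMoves (ms : List (List Char)) : Prop :=
  ∀ m ∈ ms, m ≠ [] ∧ ∀ x ∈ m, PySem.Chars.isspace x = false

theorem pv_letters_nonspace : ∀ c ∈ pvLetters, PySem.Chars.isspace c = false := by
  intro c hc; fin_cases hc <;> rfl

theorem pv_good_moveB (c nxt : Char) (hc : pvLetters.contains c = true) :
    pvMoveB c nxt ≠ [] ∧ ∀ x ∈ pvMoveB c nxt, PySem.Chars.isspace x = false := by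
  have hcs : PySem.Chars.isspace c = false := pv_letters_nonspace c (by simpa using hc)
  unfold pvMoveB
  split_ifs <;> refine ⟨by simp, ?_⟩ <;> intro x hx <;> fin_cases hx <;> first | exact hcs | decide

theorem pv_modA_nonspace (p : Char) : ∀ x ∈ pvModA p, PySem.Chars.isspace x = false := by
  unfold pvModA
  split_ifs <;> intro x hx <;> fin_cases hx <;> decide

theorem pv_good_outA' (s : List Char) : pvGoodMoves (pvOutA' s) := by
  induction s with
  | nil => intro m hm; simp [pvOutA'] at hm
  | cons c t ih =>
    intro m hm
    unfold pvOutA' at hm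
    by_cases hc : pvLetters.contains c = true
    · rw [if_pos hc] at hm
      rcases List.mem_cons.mp hm with h | h
      · subst h
        refine ⟨by simp, ?_⟩
        intro x hx
        rcases List.mem_cons.mp hx with h | h
        · rw [h]; exact pv_letters_nonspace c (by simpa using hc)
        · exact pv_modA_nonspace (t.headD '*') x h
      · exact ih m h
    · rw [if_neg hc] at hm; exact ih m hm

theorem pv_good_outB (s : List Char) : pvGoodMoves (pvOutB s) := by
  induction s with
  | nil => intro m hm; simp [pvOutB] at hm
  | cons c t ih =>
    intro m hm
    unfold pvOutB at hm
    by_cases hc : pvLetters.contains c = true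
    · rw [if_pos hc] at hm
      rcases List.mem_cons.mp hm with h | h
      · subst h; exact pv_good_moveB c (t.headD ' ') hc
      · exact ih m h
    · rw [if_neg hc] at hm; exact ih m hm

theorem pv_scan_eq_any (l : List Char) (b : Bool) (p : Char) :
    (l.foldl (fun (st : Bool × Char) c => (st.1 || (c == '*' && pvLetters.contains st.2), c))
      (b, p)).1
    = (b || ((p :: l).zip l).any (fun q => q.2 == '*' && pvLetters.contains q.1)) := by
  induction l generalizing b p with
  | nil => simp
  | cons c t ih =>
    rw [List.foldl_cons, ih]
    simp [List.zip_cons_cons, Bool.or_assoc]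

theorem pv_D_iff_any (s : String) :
    D_reverse s ↔
      (s.toList.zip s.toList.tail).any (fun q => q.2 == '*' && pvLetters.contains q.1) = true := by
  unfold D_reverse
  rw [pv_scan_eq_any]
  cases hl : s.toList with
  | nil => simp
  | cons c t =>
    have hsp : ' ' ∉ pvLetters := by decide
    simp [List.zip_cons_cons, hsp]

theorem pv_dropWhile_nonspace (l : List Char) (h : ∀ x ∈ l, PySem.Chars.isspace x = false) :
    l.dropWhile PySem.Chars.isspace = l := by
  cases l with
  | nil => rfl
  | cons x l' => rw [List.dropWhile_cons]; simp [h x (by simp)]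

theorem pv_rstrip_append (a b : List Char) (hb : PySem.Chars.rstrip b ≠ []) :
    PySem.Chars.rstrip (a ++ b) = a ++ PySem.Chars.rstrip b := by
  unfold PySem.Chars.rstrip at *
  rw [List.reverse_append, List.dropWhile_append]
  have : (b.reverse.dropWhile PySem.Chars.isspace).isEmpty = false := by
    rcases hx : b.reverse.dropWhile PySem.Chars.isspace with _ | _
    · exact absurd (by rw [hx]; rfl) hb
    · rfl
  rw [this]
  simp

theorem pv_join_ne_nil (r : List Char) (rs : List (List Char)) (hr : r ≠ []) :
    PySem.Chars.join [' '] (r :: rs) ≠ [] := by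
  cases rs with
  | nil => rw [PySem.Chars.join_singleton]; exact hr
  | cons q qs =>
    rw [PySem.Chars.join_cons_cons]
    simp [hr]

theorem pv_rstrip_flatten (ns : List (List Char)) (h : pvGoodMoves ns) :
    PySem.Chars.rstrip ((ns.map (· ++ [' '])).flatten) = PySem.Chars.join [' '] ns := by
  induction ns with
  | nil => rfl
  | cons m rest ih =>
    obtain ⟨hm, hns⟩ := h m (by simp)
    cases rest with
    | nil =>
      rw [PySem.Chars.join_singleton]
      unfold PySem.Chars.rstrip
      simp only [List.map_cons, List.map_nil, List.flatten_cons, List.flatten_nil,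
        List.append_nil, List.reverse_append]
      rw [show ([' '] : List Char).reverse = [' '] from rfl]
      rw [show ([' '] : List Char) ++ m.reverse = ' ' :: m.reverse from rfl]
      rw [List.dropWhile_cons]
      simp only [show PySem.Chars.isspace ' ' = true from rfl, if_true]
      rw [pv_dropWhile_nonspace m.reverse (fun x hx => hns x (by simpa using hx))]
      simp
    | cons r rs =>
      have hgrest : pvGoodMoves (r :: rs) := fun q hq => h q (List.mem_cons_of_mem _ hq)
      have hrne : r ≠ [] := (hgrest r (by simp)).1
      have hjoin := pv_join_ne_nil r rs hrne
      have hrest := ih hgrest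
      have hFne : PySem.Chars.rstrip (((r :: rs).map (· ++ [' '])).flatten) ≠ [] := by
        rw [hrest]; exact hjoin
      rw [List.map_cons, List.flatten_cons, pv_rstrip_append _ _ hFne, hrest,
        PySem.Chars.join_cons_cons]

theorem pv_strip_flatten (ns : List (List Char)) (h : pvGoodMoves ns) :
    PySem.Chars.strip ((ns.map (· ++ [' '])).flatten) = PySem.Chars.join [' '] ns := by
  cases ns with
  | nil => rfl
  | cons m rest =>
    obtain ⟨hm, hns⟩ := h m (by simp)
    unfold PySem.Chars.strip PySem.Chars.lstrip
    cases m with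
    | nil => exact absurd rfl hm
    | cons x m' =>
      rw [List.map_cons, List.flatten_cons]
      rw [show ((x :: m') ++ [' ']) ++ (rest.map (· ++ [' '])).flatten
            = x :: ((m' ++ [' ']) ++ (rest.map (· ++ [' '])).flatten) by simp]
      rw [List.dropWhile_cons]
      simp only [hns x (by simp), Bool.false_eq_true, if_false]
      have := pv_rstrip_flatten ((x :: m') :: rest) h
      simpa [PySem.Chars.rstrip] using this

-- number of move letters immediately followed by a literal '*'
def pvStars : List Char → Nat
  | [] => 0
  | c :: t => (if pvLetters.contains c = true ∧ t.headD ' ' = '*' then 1 else 0) + pvStars t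

theorem pv_stars_pos (s : List Char)
    (h : (s.zip s.tail).any (fun q => q.2 == '*' && pvLetters.contains q.1) = true) :
    pvStars s ≠ 0 := by
  induction s with
  | nil => simp at h
  | cons c t ih =>
    cases t with
    | nil => simp at h
    | cons d t' =>
      simp only [List.tail_cons, List.zip_cons_cons, List.any_cons, Bool.or_eq_true] at h
      unfold pvStars
      rcases h with h | h
      · have h' : d = '*' ∧ pvLetters.contains c = true := by simpa using h
        rw [if_pos ⟨h'.2, by simp [h'.1]⟩]
        omega
      · have := ih (by simpa using h)
        omega

theorem pv_outB_ne_nil_of_stars (s : List Char) (h : pvStars s ≠ 0) : pvOutB s ≠ [] := by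
  induction s with
  | nil => simp [pvStars] at h
  | cons c t ih =>
    unfold pvStars at h
    by_cases hc : c ∈ pvLetters
    · simp [pvOutB, hc]
    · have hcc : pvLetters.contains c = false := by simpa using hc
      simp only [hcc, Bool.false_eq_true, false_and, if_false, Nat.zero_add] at h
      simp only [pvOutB, hcc, Bool.false_eq_true, if_false]
      exact ih h

theorem pv_count_moves (s : List Char) : (pvOutA' s).length = (pvOutB s).length := by
  induction s with
  | nil => rfl
  | cons c t ih =>
    by_cases hc : c ∈ pvLetters <;> simp [pvOutA', pvOutB, hc, ih]

theorem pv_len_moves (s : List Char) :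
    ((pvOutA' s).map List.length).sum = ((pvOutB s).map List.length).sum + pvStars s := by
  induction s with
  | nil => rfl
  | cons c t ih =>
    unfold pvOutA' pvOutB pvStars
    by_cases hc : pvLetters.contains c = true
    · have hc' : c ∈ pvLetters := by simpa using hc
      rw [if_pos hc, if_pos hc]
      simp only [List.map_cons, List.sum_cons, List.length_cons]
      have hpt : (pvModA (t.headD '*')).length
          = (pvMoveB c (t.headD ' ')).length - 1
            + (if pvLetters.contains c = true ∧ t.headD ' ' = '*' then 1 else 0) := by
        cases t with
        | nil => simp [pvModA, pvMoveB]
        | cons d t' =>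
          simp only [List.headD_cons]
          unfold pvModA pvMoveB
          by_cases h1 : d = ' '
          · simp [h1]
          · by_cases h2 : d = '2'
            · simp [h2]
            · by_cases h3 : d = '*' <;> simp [h1, h2, h3, hc']
      have hmv : 1 ≤ (pvMoveB c (t.headD ' ')).length := by
        unfold pvMoveB; split_ifs <;> simp
      omega
    · rw [if_neg hc, if_neg hc]
      have hcc : pvLetters.contains c = false := by
        simpa using hc
      simp only [hcc, Bool.false_eq_true, false_and, if_false]
      omega

theorem pv_join_len (ns : List (List Char)) (h : ns ≠ []) :
    (PySem.Chars.join [' '] ns).length + 1 = (ns.map List.length).sum + ns.length := by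
  induction ns with
  | nil => exact absurd rfl h
  | cons m rest ih =>
    cases rest with
    | nil => simp [PySem.Chars.join_singleton]
    | cons r rs =>
      rw [PySem.Chars.join_cons_cons]
      have := ih (by simp)
      simp only [List.map_cons, List.sum_cons, List.length_cons, List.length_nil,
        List.length_append] at *
      omega

-- ===== VERDICT (by name: the statement is the Claim_ definition above) =====
theorem reverse_spec : Claim_unchanged_reverse := by
  intro scramble _ hnD
  show reverse scramble = reverse_alt scramble
  have hD' : ∀ p ∈ scramble.toList.zip scramble.toList.tail,
      ¬(pvLetters.contains p.1 = true ∧ p.2 = '*') := by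
    intro p hp hcon
    exact hnD ((pv_D_iff_any scramble).mpr (by
      rw [List.any_eq_true]
      exact ⟨p, hp, by
        simp only [Bool.and_eq_true, beq_iff_eq]
        exact ⟨hcon.2, hcon.1⟩⟩))
  simp only [reverse, reverse_alt]
  rw [pv_A_char, pv_B_moves_gen, List.nil_append, pv_outA_moves, pv_moves_eq _ hD']
  rw [← List.map_reverse]
  rw [pv_strip_flatten _ (fun m hm => pv_good_outB scramble.toList m (List.mem_reverse.mp hm))]

theorem reverse_changed : Claim_changed_reverse := by
  unfold Claim_changed_reverse; decide

theorem reverse_tight : Claim_exact_reverse := by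
  intro scramble _ hD heq
  have hany := (pv_D_iff_any scramble).mp hD
  have hstars := pv_stars_pos scramble.toList hany
  have hBne := pv_outB_ne_nil_of_stars scramble.toList hstars
  have hAne : pvOutA' scramble.toList ≠ [] := by
    intro h
    apply hBne
    have hlen := pv_count_moves scramble.toList
    rw [h] at hlen
    exact List.eq_nil_of_length_eq_zero hlen.symm
  have hA : reverse scramble
      = String.ofList (PySem.Chars.join [' '] (pvOutA' scramble.toList).reverse) := by
    simp only [reverse]
    rw [pv_A_char, pv_outA_moves, ← List.map_reverse,
      pv_strip_flatten _ (fun m hm => pv_good_outA' scramble.toList m (List.mem_reverse.mp hm))]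
  have hB : reverse_alt scramble
      = String.ofList (PySem.Chars.join [' '] (pvOutB scramble.toList).reverse) := by
    simp only [reverse_alt]
    rw [pv_B_moves_gen, List.nil_append]
  rw [hA, hB] at heq
  have hlists := congrArg String.toList heq
  rw [String.toList_ofList, String.toList_ofList] at hlists
  have hlen := congrArg List.length hlists
  have hjA := pv_join_len (pvOutA' scramble.toList).reverse (by simpa using hAne)
  have hjB := pv_join_len (pvOutB scramble.toList).reverse (by simpa using hBne)
  have hsum := pv_len_moves scramble.toList
  have hcnt := pv_count_moves scramble.toList
  simp only [List.map_reverse, List.sum_reverse, List.length_reverse] at hjA hjB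
  omega
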